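-- pv_equiv track=rewrite | github.com/cshenlua/solve | solve.py | solve
-- ===== SOURCE A (Python) =====
-- from itertools import combinations
--
-- def solve(wordList, target):
--     res = []
--     comb_wordList = combinations(wordList,2)
--     for comb in comb_wordList:
--         if comb[0]+comb[1] == target:
--             res.append(comb)
--     if len(res):
--         return res
--     else:
--         return None
-- ===== SOURCE B (Python) =====
-- def solve(wordList, target):
--     idx = {}
--     for j, w in enumerate(wordList):
--         idx.setdefault(w, []).append(j)
--     res = []
--     for i, w in enumerate(wordList):
--         if target.startswith(w):
--             suf = target[len(w):]
--             for j in idx.get(suf, ()):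
--                 if j > i:
--                     res.append((w, suf))
--     return res if res else None
-- ===== Notes on version B (the rewrite author's own statement) =====
-- stated objective: faster
-- what changed: Replaces the scan of all O(n^2) index pairs by a word->indices hash built in one pass; for each position i whose word is a prefix of the target, the required suffix is looked up and its indices j>i are emitted.
import Mathlib
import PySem

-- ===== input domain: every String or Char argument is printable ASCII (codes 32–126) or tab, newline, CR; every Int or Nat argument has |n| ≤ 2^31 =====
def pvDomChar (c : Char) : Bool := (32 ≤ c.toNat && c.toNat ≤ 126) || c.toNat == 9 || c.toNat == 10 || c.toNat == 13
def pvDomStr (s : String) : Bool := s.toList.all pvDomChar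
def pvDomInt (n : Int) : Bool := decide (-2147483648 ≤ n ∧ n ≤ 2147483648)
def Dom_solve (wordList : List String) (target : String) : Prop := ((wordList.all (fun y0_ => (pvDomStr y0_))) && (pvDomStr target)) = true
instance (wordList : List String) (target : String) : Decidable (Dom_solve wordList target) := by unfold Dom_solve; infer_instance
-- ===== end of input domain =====

-- B replaces A's scan of all index pairs by a word→indices map built in one pass; for each position
-- whose word is a prefix of the target, the required suffix is looked up and its later indices emitted (measured faster).

-- ===== PORT A =====
-- itertools.combinations(wordList, 2), in the order Python yields the pairs
def pvCombos2 : List String → List (String × String)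
  | [] => []
  | x :: xs => xs.map (fun y => (x, y)) ++ pvCombos2 xs

-- res after the for-loop: 'if comb[0]+comb[1] == target: res.append(comb)'
def pvResA (wordList : List String) (target : String) : List (String × String) :=
  (pvCombos2 wordList).foldl (fun r c => if c.1 ++ c.2 = target then r ++ [c] else r) []

def solve (wordList : List String) (target : String) : Option (List (String × String)) :=
  if (pvResA wordList target).length ≠ 0 then some (pvResA wordList target) else none

-- ===== PORT B =====
-- idx.setdefault(w, []).append(j)  ==  idx[w] = idx.get(w, []) + [j]  ==  Dict.modify
def pvIdxB (wordList : List String) : PySem.Dict String (List Int) :=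
  (PySem.List.enumerate wordList).foldl
    (fun d p => d.modify p.2 [] (fun l => l ++ [p.1])) PySem.Dict.empty

-- res after the for-loop over enumerate(wordList)
def pvResB (wordList : List String) (target : String) : List (String × String) :=
  (PySem.List.enumerate wordList).foldl
    (fun r p =>
      if PySem.Str.startswith target p.2 then
        ((pvIdxB wordList).getD (PySem.Str.slice target (some (PySem.Str.len p.2)) none) []).foldl
          (fun r j => if p.1 < j then r ++ [(p.2, PySem.Str.slice target (some (PySem.Str.len p.2)) none)] else r) r
      else r) []

def solve_alt (wordList : List String) (target : String) : Option (List (String × String)) :=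
  if (pvResB wordList target).length ≠ 0 then some (pvResB wordList target) else none

-- ===== PRECONDITION & SPEC =====
def Spec_solve (wordList : List String) (target : String) (out : Option (List (String × String))) : Prop := out = solve_alt wordList target
instance (wordList : List String) (target : String) (out : Option (List (String × String))) : Decidable (Spec_solve wordList target out) := by unfold Spec_solve; infer_instance

-- ===== CLAIM (what is proved, stated in full; the proofs are below) =====
def Claim_equal_solve : Prop := ∀ (wordList : List String) (target : String), Dom_solve wordList target → Spec_solve wordList target (solve wordList target)

-- ===== LEMMAS AND PROOFS =====

-- 'for x in l: if p(x): out.append(f(x))' with a Prop test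
theorem pv_foldl_if {α β : Type} (p : α → Prop) [DecidablePred p] (f : α → β)
    (l : List α) (acc : List β) :
    l.foldl (fun acc x => if p x then acc ++ [f x] else acc) acc
      = acc ++ (l.filter (fun x => decide (p x))).map f := by
  induction l generalizing acc with
  | nil => simp
  | cons x xs ih => by_cases h : p x <;> simp [h, ih]

-- the grouping dict: idx[suf] is the ascending list of indices j with wordList[j] = suf
theorem pv_idx_getD (wordList : List String) (suf : String) :
    (pvIdxB wordList).getD suf []
      = ((PySem.List.enumerate wordList).filter (fun q => decide (q.2 = suf))).map Prod.fst := by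
  have h1 : pvIdxB wordList
      = ((PySem.List.enumerate wordList).map Prod.swap).foldl
          (fun d p => d.modify p.1 [] (fun l => l ++ [p.2])) PySem.Dict.empty := by
    rw [List.foldl_map]
    simp [pvIdxB, Prod.swap]
  rw [h1, PySem.Dict.getD_foldl_modify_append]
  rw [List.filter_map, List.map_map]
  simp [Function.comp_def, Prod.swap]
  have h2 : List.filter (fun (x : Int × String) => x.2 == suf) (PySem.List.enumerate wordList)
      = List.filter (fun q => decide (q.2 = suf)) (PySem.List.enumerate wordList) :=
    List.filter_congr (fun x _ => by cases h : x.2 == suf <;> simp_all)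
  rw [h2]

-- counting: among the indices of suf, those > i are as many as the copies of suf after position i
theorem pv_count (suf : String) (l : List String) : ∀ (s i : Int),
    ((((PySem.List.enumerate l s).filter (fun q => decide (q.2 = suf))).map Prod.fst).filter
        (fun j => decide (i < j))).length
      = ((l.drop (i - s + 1).toNat).filter (fun y => decide (y = suf))).length := by
  induction l with
  | nil => intro s i; simp [PySem.List.enumerate_nil]
  | cons x l' ih =>
    intro s i
    rw [PySem.List.enumerate_cons]
    by_cases hi : i < s
    · have h0 : (i - s + 1).toNat = 0 := by omega
      have h0' : (i - (s + 1) + 1).toNat = 0 := by omega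
      have := ih (s + 1) i
      rw [h0'] at this
      by_cases hx : x = suf <;>
        simp [hx, hi, h0, this]
    · have hs : (i - s + 1).toNat = (i - (s + 1) + 1).toNat + 1 := by omega
      have := ih (s + 1) i
      by_cases hx : x = suf <;>
        simp [hx, hi, hs, this]

-- A's filtered combinations as a flatMap over enumerate, for any F matching on each element
theorem pv_combos_flat (target : String) (F : Int × String → List (String × String)) :
    ∀ (l : List String) (s : Int),
    (∀ (k : Nat) (h : k < l.length), F (s + (k : Int), l[k]) =
        ((l.drop (k + 1)).filter (fun y => decide (l[k] ++ y = target))).map (fun y => (l[k], y))) →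
    (pvCombos2 l).filter (fun c => decide (c.1 ++ c.2 = target))
      = (PySem.List.enumerate l s).flatMap F := by
  intro l
  induction l with
  | nil => intro s _; simp [pvCombos2, PySem.List.enumerate_nil]
  | cons x l' ih =>
    intro s hF
    rw [PySem.List.enumerate_cons]
    simp only [pvCombos2, List.filter_append, List.flatMap_cons]
    congr 1
    · have h0 := hF 0 (by simp)
      simp only [Nat.cast_zero, add_zero, List.getElem_cons_zero, Nat.zero_add,
        List.drop_succ_cons, List.drop_zero] at h0
      rw [List.filter_map, h0]
      rfl
    · apply ih (s + 1)
      intro k hk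
      have h := hF (k + 1) (by simpa using Nat.succ_lt_succ hk)
      simp only [List.getElem_cons_succ, List.drop_succ_cons] at h
      have harg : s + ((k : Int) + 1) = s + 1 + (k : Int) := by ring
      rw [Nat.cast_add, Nat.cast_one, harg] at h
      exact h

-- B's per-iteration contribution (proof-only helper)
def pvG (wl : List String) (target : String) : Int × String → List (String × String) :=
  fun p =>
    if PySem.Str.startswith target p.2 then
      ((((pvIdxB wl).getD (PySem.Str.slice target (some (PySem.Str.len p.2)) none) []).filter
          (fun j => decide (p.1 < j))).map
        (fun _ => (p.2, PySem.Str.slice target (some (PySem.Str.len p.2)) none)))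
    else []

-- B's loop is the flatMap of its per-iteration contributions
theorem pv_resB_flat (wl : List String) (target : String) :
    pvResB wl target = (PySem.List.enumerate wl).flatMap (pvG wl target) := by
  unfold pvResB
  rw [PySem.List.foldl_congr_mem _ _ (fun r p => r ++ pvG wl target p) _ ?_]
  · rw [PySem.List.foldl_append_eq_flatMap]
    simp
  · intro acc p hp
    by_cases hs : PySem.Str.startswith target p.2
    · rw [if_pos hs]
      rw [pv_foldl_if (fun j => p.1 < j)
        (fun _ => (p.2, PySem.Str.slice target (some (PySem.Str.len p.2)) none))]
      simp only [pvG]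
      rw [if_pos hs]
    · rw [if_neg hs]
      simp only [pvG]
      rw [if_neg hs, List.append_nil]

-- per element: B's contribution at index k equals A's pairs from position k
theorem pv_elem (wl : List String) (target : String) (k : Nat) (hk : k < wl.length) :
    pvG wl target ((k : Int), wl[k])
      = ((wl.drop (k + 1)).filter (fun y => decide (wl[k] ++ y = target))).map
          (fun y => (wl[k], y)) := by
  by_cases hsw : PySem.Str.startswith target wl[k]
  · obtain ⟨t, ht⟩ : wl[k].toList <+: target.toList :=
      (PySem.Chars.startswith_iff _ _).mp (by rw [← PySem.Str.startswith_eq]; exact hsw)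
    have hsufl : (PySem.Str.slice target (some (PySem.Str.len wl[k])) none).toList = t := by
      rw [PySem.Str.toList_slice, PySem.Chars.slice_eq_listSlice, PySem.Str.len_eq,
        PySem.List.slice_from _ (Int.natCast_nonneg _)]
      rw [← ht]
      simp [Int.toNat_natCast]
    have hpred : ∀ y : String,
        (wl[k] ++ y = target) ↔ y = PySem.Str.slice target (some (PySem.Str.len wl[k])) none := by
      intro y
      rw [← String.toList_inj, ← String.toList_inj, String.toList_append, hsufl, ← ht]
      constructor
      · intro h
        have : wl[k].toList ++ y.toList = wl[k].toList ++ t := by rw [h, ht]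
        exact List.append_cancel_left this
      · intro h
        rw [h, ht]
    -- A's filter keeps exactly the copies of the suffix
    have hfilt : (wl.drop (k + 1)).filter (fun y => decide (wl[k] ++ y = target))
        = (wl.drop (k + 1)).filter
            (fun y => decide (y = PySem.Str.slice target (some (PySem.Str.len wl[k])) none)) :=
      List.filter_congr (fun y _ => by simp [hpred y])
    rw [hfilt]
    have hmap : ∀ (l : List String),
        ((l.filter (fun y => decide (y = PySem.Str.slice target (some (PySem.Str.len wl[k])) none))).map
            (fun y => (wl[k], y)))
        = (l.filter (fun y => decide (y = PySem.Str.slice target (some (PySem.Str.len wl[k])) none))).map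
            (fun _ => (wl[k], PySem.Str.slice target (some (PySem.Str.len wl[k])) none)) := by
      intro l
      apply List.map_congr_left
      intro y hy
      have := (List.mem_filter.mp hy).2
      simp at this
      simp [this, PySem.Str.len_eq]
    rw [hmap]
    unfold pvG
    rw [if_pos hsw, pv_idx_getD]
    rw [List.map_const', List.map_const']
    congr 1
    have := pv_count (PySem.Str.slice target (some (PySem.Str.len wl[k])) none) wl 0 (k : Int)
    have harith : ((k : Int) - 0 + 1).toNat = k + 1 := by omega
    rw [harith] at this
    exact this
  · -- word is not a prefix of target: both sides are empty
    have hempty : (wl.drop (k + 1)).filter (fun y => decide (wl[k] ++ y = target)) = [] := by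
      apply List.filter_eq_nil_iff.mpr
      intro y hy
      simp only [decide_eq_true_eq]
      intro h
      apply hsw
      rw [PySem.Str.startswith_eq]
      apply (PySem.Chars.startswith_iff _ _).mpr
      exact ⟨y.toList, by rw [← String.toList_append, h]⟩
    rw [hempty]
    simp only [pvG]
    rw [if_neg hsw, List.map_nil]

theorem pv_foldl_ifA (target : String) (l : List (String × String)) (acc : List (String × String)) :
    l.foldl (fun r c => if c.1 ++ c.2 = target then r ++ [c] else r) acc
      = acc ++ l.filter (fun c => decide (c.1 ++ c.2 = target)) := by
  induction l generalizing acc with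
  | nil => simp
  | cons c cs ih => by_cases h : c.1 ++ c.2 = target <;> simp [h, ih]

theorem pv_res_eq (wordList : List String) (target : String) :
    pvResA wordList target = pvResB wordList target := by
  unfold pvResA
  rw [pv_foldl_ifA]
  rw [pv_resB_flat]
  rw [List.nil_append]
  apply pv_combos_flat target (pvG wordList target) wordList 0
  intro k hk
  rw [zero_add]
  exact pv_elem wordList target k hk

-- ===== VERDICT (by name: the statement is the Claim_ definition above) =====
theorem solve_spec : Claim_equal_solve := by
  intro wl t _
  unfold Spec_solve solve solve_alt
  rw [pv_res_eq]
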